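-- pv_equiv track=rewrite | github.com/SamBauter/advent_of_code | 2018/day2.py | inv_man
-- ===== SOURCE A (Python) =====
-- def inv_man(s: str) -> int:
--     twos = 0
--     threes = 0
--     for line in s.splitlines():
--         found3 = False
--         found2 = False
--         for c in line:
--             count = line.count(c)
--             if found2 and found3:
--                 break
--             elif count==3 and not found3:
--                 threes+=1
--                 found3= True
--             elif count==2 and not found2:
--                 twos+=1
--                 found2= True
--     return twos*threes
-- ===== SOURCE B (Python) =====
-- def inv_man(s: str) -> int:
--     twos = 0
--     threes = 0
--     for line in s.splitlines():
--         counts = {}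
--         for c in line:
--             counts[c] = counts.get(c, 0) + 1
--         vals = counts.values()
--         twos += 2 in vals
--         threes += 3 in vals
--     return twos * threes
-- ===== Notes on version B (the rewrite author's own statement) =====
-- stated objective: faster
-- what changed: B builds a per-line character-count dict in one pass and tests whether 2/3 occur among its values, instead of A's rescan of the whole line with line.count(c) for every character.
import Mathlib
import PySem

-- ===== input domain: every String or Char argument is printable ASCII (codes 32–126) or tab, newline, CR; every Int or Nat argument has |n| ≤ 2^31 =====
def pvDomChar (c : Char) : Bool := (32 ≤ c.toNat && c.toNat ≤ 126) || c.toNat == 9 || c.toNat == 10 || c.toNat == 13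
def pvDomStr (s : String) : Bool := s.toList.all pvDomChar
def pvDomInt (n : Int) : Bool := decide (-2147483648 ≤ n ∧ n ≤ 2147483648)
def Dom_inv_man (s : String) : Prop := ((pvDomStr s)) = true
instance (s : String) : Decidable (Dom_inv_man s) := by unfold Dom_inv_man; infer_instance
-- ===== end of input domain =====

-- B replaces A's per-character line.count rescans with one dict-counting pass per line; same return value.

-- ===== PORT A =====
-- inner loop over the characters of `line`, carrying (twos, threes, found2, found3) with early break
def invManInner (line : List Char) : List Char → Int → Int → Bool → Bool → Int × Int
  | [], twos, threes, _, _ => (twos, threes)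
  | c :: rest, twos, threes, f2, f3 =>
    let count := line.count c
    if f2 && f3 then (twos, threes)
    else if count == 3 && !f3 then invManInner line rest twos (threes + 1) f2 true
    else if count == 2 && !f2 then invManInner line rest (twos + 1) threes true f3
    else invManInner line rest twos threes f2 f3

def inv_man (s : String) : Int :=
  let r := (PySem.Str.splitlines s).foldl
    (fun (acc : Int × Int) line => invManInner line.toList line.toList acc.1 acc.2 false false)
    (0, 0)
  r.1 * r.2

-- ===== PORT B =====
def inv_man_alt (s : String) : Int :=
  let r := (PySem.Str.splitlines s).foldl
    (fun (acc : Int × Int) line =>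
      let counts := line.toList.foldl
        (fun (d : PySem.Dict Char Int) c => d.insert c (d.getD c 0 + 1)) PySem.Dict.empty
      let vals := counts.values
      (acc.1 + (if (2 : Int) ∈ vals then 1 else 0),
       acc.2 + (if (3 : Int) ∈ vals then 1 else 0)))
    (0, 0)
  r.1 * r.2

-- ===== PRECONDITION & SPEC =====
def Spec_inv_man (s : String) (out : Int) : Prop := out = inv_man_alt s
instance (s : String) (out : Int) : Decidable (Spec_inv_man s out) := by unfold Spec_inv_man; infer_instance

-- ===== CLAIM (what is proved, stated in full; the proofs are below) =====
def Claim_equal_inv_man : Prop := ∀ (s : String), Dom_inv_man s → Spec_inv_man s (inv_man s)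

-- ===== LEMMAS AND PROOFS =====

-- A's inner loop adds 1 to twos/threes iff the flag is still down and some remaining char has count 2/3
theorem invManInner_eq (line : List Char) :
    ∀ (cs : List Char) (twos threes : Int) (f2 f3 : Bool),
    invManInner line cs twos threes f2 f3 =
      (twos + (if f2 = false ∧ ∃ c ∈ cs, line.count c = 2 then 1 else 0),
       threes + (if f3 = false ∧ ∃ c ∈ cs, line.count c = 3 then 1 else 0)) := by
  intro cs
  induction cs with
  | nil => intro twos threes f2 f3; simp [invManInner]
  | cons c rest ih =>
    intro twos threes f2 f3
    simp only [invManInner]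
    by_cases h23 : (f2 && f3) = true
    · obtain ⟨h2, h3⟩ := Bool.and_eq_true_iff.mp h23
      simp [h2, h3]
    · rw [if_neg h23]
      by_cases hb3 : (line.count c == 3 && !f3) = true
      · obtain ⟨hc3, hf3⟩ := Bool.and_eq_true_iff.mp hb3
        have hc3' : line.count c = 3 := by simpa using hc3
        have hf3' : f3 = false := by simpa using hf3
        rw [if_pos hb3, ih]
        simp only [Prod.mk.injEq, List.exists_mem_cons_iff, hc3', hf3']
        constructor
        · simp
        · simp
      · rw [if_neg hb3]
        by_cases hb2 : (line.count c == 2 && !f2) = true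
        · obtain ⟨hc2, hf2⟩ := Bool.and_eq_true_iff.mp hb2
          have hc2' : line.count c = 2 := by simpa using hc2
          have hf2' : f2 = false := by simpa using hf2
          rw [if_pos hb2, ih]
          simp only [Prod.mk.injEq, List.exists_mem_cons_iff, hc2', hf2']
          constructor
          · simp
          · simp
        · rw [if_neg hb2, ih]
          simp only [Prod.mk.injEq, List.exists_mem_cons_iff]
          constructor
          · cases f2 with
            | true => simp
            | false =>
              have hcc : line.count c ≠ 2 := fun h => hb2 (by simp [h])
              simp [hcc]
          · cases f3 with
            | true => simp
            | false =>
              have hcc : line.count c ≠ 3 := fun h => hb3 (by simp [h])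
              simp [hcc]

-- B's per-line dict is Counter(line); membership of v among its values is "some char occurs v times"
theorem vals_mem_iff (line : List Char) (n : Nat) :
    ((n : Int) ∈ (line.foldl (fun (d : PySem.Dict Char Int) c => d.insert c (d.getD c 0 + 1))
            PySem.Dict.empty).values)
      ↔ ∃ c ∈ line, line.count c = n := by
  rw [PySem.Dict.foldl_insert_getD_add_one_eq_counter]
  simp only [PySem.Dict.values, PySem.Dict.items_counter, List.map_map, List.mem_map,
    Function.comp]
  constructor
  · rintro ⟨c, hc, hv⟩
    exact ⟨c, (PySem.Set.mem_ofList _ _).mp hc, by exact_mod_cast hv⟩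
  · rintro ⟨c, hc, hv⟩
    exact ⟨c, (PySem.Set.mem_ofList _ _).mpr hc, by exact_mod_cast hv⟩

theorem step_eq (acc : Int × Int) (line : String) :
    invManInner line.toList line.toList acc.1 acc.2 false false =
      (let counts := line.toList.foldl
        (fun (d : PySem.Dict Char Int) c => d.insert c (d.getD c 0 + 1)) PySem.Dict.empty
       let vals := counts.values
       (acc.1 + (if (2 : Int) ∈ vals then 1 else 0),
        acc.2 + (if (3 : Int) ∈ vals then 1 else 0))) := by
  rw [invManInner_eq]
  have h2 := vals_mem_iff line.toList 2
  have h3 := vals_mem_iff line.toList 3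
  push_cast at h2 h3
  simp only [h2, h3, true_and]

-- ===== VERDICT (by name: the statement is the Claim_ definition above) =====
theorem inv_man_spec : Claim_equal_inv_man := by
  intro s _
  unfold Spec_inv_man inv_man inv_man_alt
  have h : (fun (acc : Int × Int) line => invManInner line.toList line.toList acc.1 acc.2 false false)
      = (fun (acc : Int × Int) (line : String) =>
          let counts := line.toList.foldl
            (fun (d : PySem.Dict Char Int) c => d.insert c (d.getD c 0 + 1)) PySem.Dict.empty
          let vals := counts.values
          (acc.1 + (if (2 : Int) ∈ vals then 1 else 0),
           acc.2 + (if (3 : Int) ∈ vals then 1 else 0))) := by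
    funext acc line; exact step_eq acc line
  rw [h]
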